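-- pv_equiv track=rewrite | github.com/leothefleo49/TypeKeep | database.py | _looks_like_list_entry
-- ===== SOURCE A (Python) =====
-- def _looks_like_list_entry(events_before_enter, events_after_enter):
--     """Detect list-like patterns: text → Enter → text → Enter ...
--
--     Returns True if the text around Enter keys looks like a list being
--     typed (e.g., bullet points, numbered items, short lines).
--     """
--     if not events_after_enter:
--         return False
--
--     # Count text chars before this Enter
--     chars_before = 0
--     for e in reversed(events_before_enter):
--         kn = (e.get('key_name') or '').lower()
--         if 'enter' in kn or 'return' in kn:
--             break
--         if e.get('character') or 'space' in kn:
--             chars_before += 1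
--     # Short lines (< 120 chars) followed by another Enter → list pattern
--     if 1 <= chars_before <= 120:
--         return True
--     return False
-- ===== SOURCE B (Python) =====
-- def _looks_like_list_entry(events_before_enter, events_after_enter):
--     if not events_after_enter:
--         return False
--     # Staged passes: locate the start of the last line (just after the last
--     # Enter/Return event), slice it out, then count its character/space events.
--     cut = 0
--     for i, e in enumerate(events_before_enter):
--         kn = (e.get('key_name') or '').lower()
--         if 'enter' in kn or 'return' in kn:
--             cut = i + 1
--     last_line = events_before_enter[cut:]
--     chars_before = len([e for e in last_line
--                         if e.get('character') or 'space' in (e.get('key_name') or '').lower()])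
--     return 1 <= chars_before <= 120
-- ===== Notes on version B (the rewrite author's own statement) =====
-- stated objective: alternative
-- what changed: Replaces A's single backward scan with early break on Enter/Return by staged passes: one pass locating the start of the last line (index after the last Enter/Return), a slice taking that suffix, then a filter-and-count of its character/space events.
import Mathlib
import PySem

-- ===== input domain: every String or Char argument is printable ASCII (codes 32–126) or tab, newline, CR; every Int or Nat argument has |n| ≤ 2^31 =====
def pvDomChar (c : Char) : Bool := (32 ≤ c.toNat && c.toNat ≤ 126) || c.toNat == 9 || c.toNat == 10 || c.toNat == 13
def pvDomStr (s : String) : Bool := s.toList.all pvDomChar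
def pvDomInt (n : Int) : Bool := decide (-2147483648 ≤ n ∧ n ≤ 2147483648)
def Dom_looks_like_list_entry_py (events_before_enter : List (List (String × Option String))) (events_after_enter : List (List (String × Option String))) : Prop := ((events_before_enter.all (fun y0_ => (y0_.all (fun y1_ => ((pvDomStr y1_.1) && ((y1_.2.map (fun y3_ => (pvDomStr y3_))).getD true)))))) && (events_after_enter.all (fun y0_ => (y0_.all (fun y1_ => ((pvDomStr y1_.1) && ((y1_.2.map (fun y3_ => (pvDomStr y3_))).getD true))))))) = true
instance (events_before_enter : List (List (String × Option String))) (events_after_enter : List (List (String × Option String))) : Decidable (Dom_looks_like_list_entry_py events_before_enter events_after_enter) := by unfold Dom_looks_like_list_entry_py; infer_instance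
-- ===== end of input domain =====

-- B replaces A's backward early-break scan by staged passes (find the last Enter/Return index, slice the suffix, filter-and-count); alternative decomposition, same cost. Return-value equivalence only; neither program mutates its arguments.


-- ===== PORT A =====
-- A's backward scan with break: chars counted from the end until an Enter/Return event;
-- kn and the truthiness test of e.get('character') are inlined exactly as in A.
def pvCountBack : List (List (String × Option String)) → Nat
  | [] => 0
  | e :: rest =>
    let kn := PySem.Str.lower (((PySem.Dict.get? (PySem.Dict.mk e) "key_name").getD none).getD "")
    if PySem.Str.isIn "enter" kn || PySem.Str.isIn "return" kn then 0
    else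
      (if !(((PySem.Dict.get? (PySem.Dict.mk e) "character").getD none).getD "").toList.isEmpty
          || PySem.Str.isIn "space" kn then 1 else 0) + pvCountBack rest

def looks_like_list_entry_py (events_before_enter : List (List (String × Option String))) (events_after_enter : List (List (String × Option String))) : Bool :=
  if events_after_enter = [] then false
  else
    let chars_before := pvCountBack events_before_enter.reverse
    if 1 ≤ chars_before ∧ chars_before ≤ 120 then true else false

-- ===== PORT B =====
-- 'enter' in kn or 'return' in kn
def pvSep (e : List (String × Option String)) : Bool :=
  let kn := PySem.Str.lower (((PySem.Dict.get? (PySem.Dict.mk e) "key_name").getD none).getD "")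
  PySem.Str.isIn "enter" kn || PySem.Str.isIn "return" kn

-- e.get('character') or 'space' in (e.get('key_name') or '').lower()
def pvChar (e : List (String × Option String)) : Bool :=
  !(((PySem.Dict.get? (PySem.Dict.mk e) "character").getD none).getD "").toList.isEmpty
  || PySem.Str.isIn "space" (PySem.Str.lower (((PySem.Dict.get? (PySem.Dict.mk e) "key_name").getD none).getD ""))

-- pass 1: index just after the last Enter/Return event (0 if none)
def pvCut (l : List (List (String × Option String))) : Int :=
  (PySem.List.enumerate l).foldl (fun cut p => if pvSep p.2 then p.1 + 1 else cut) 0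

def looks_like_list_entry_py_alt (events_before_enter : List (List (String × Option String))) (events_after_enter : List (List (String × Option String))) : Bool :=
  if events_after_enter = [] then false
  else
    let last_line := PySem.List.slice events_before_enter (some (pvCut events_before_enter)) none
    let chars_before := (last_line.filter pvChar).length
    decide (1 ≤ chars_before ∧ chars_before ≤ 120)

-- ===== PRECONDITION & SPEC =====
def Spec_looks_like_list_entry_py (events_before_enter : List (List (String × Option String))) (events_after_enter : List (List (String × Option String))) (out : Bool) : Prop := out = looks_like_list_entry_py_alt events_before_enter events_after_enter
instance (events_before_enter : List (List (String × Option String))) (events_after_enter : List (List (String × Option String))) (out : Bool) : Decidable (Spec_looks_like_list_entry_py events_before_enter events_after_enter out) := by unfold Spec_looks_like_list_entry_py; infer_instance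

-- ===== CLAIM (what is proved, stated in full; the proofs are below) =====
def Claim_equal_looks_like_list_entry_py : Prop := ∀ (events_before_enter : List (List (String × Option String))) (events_after_enter : List (List (String × Option String))), Dom_looks_like_list_entry_py events_before_enter events_after_enter → Spec_looks_like_list_entry_py events_before_enter events_after_enter (looks_like_list_entry_py events_before_enter events_after_enter)

-- ===== LEMMAS AND PROOFS =====
theorem pv_enumerate_append_singleton {α : Type} (l : List α) (e : α) (s : Int) :
    PySem.List.enumerate (l ++ [e]) s = PySem.List.enumerate l s ++ [(s + l.length, e)] := by
  induction l generalizing s with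
  | nil => simp [PySem.List.enumerate_cons, PySem.List.enumerate_nil]
  | cons x xs ih =>
    simp only [List.cons_append, PySem.List.enumerate_cons, ih, List.length_cons]
    have h : s + ((xs.length : Int) + 1) = s + 1 + (xs.length : Int) := by ring
    push_cast
    rw [h]

theorem pvCut_append (l : List (List (String × Option String))) (e : List (String × Option String)) :
    pvCut (l ++ [e]) = if pvSep e then (l.length : Int) + 1 else pvCut l := by
  unfold pvCut
  rw [pv_enumerate_append_singleton, List.foldl_append]
  simp

theorem pvCut_bounds (l : List (List (String × Option String))) :
    0 ≤ pvCut l ∧ pvCut l ≤ (l.length : Int) := by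
  induction l using List.reverseRecOn with
  | nil => simp [pvCut, PySem.List.enumerate_nil]
  | append_singleton l e ih =>
    rw [pvCut_append]
    split_ifs
    · refine ⟨by omega, by simp⟩
    · simp
      omega

-- A's backward break-count of the reversed list = length of B's filtered suffix
theorem countBack_eq_filter_suffix (l : List (List (String × Option String))) :
    pvCountBack l.reverse
      = ((PySem.List.slice l (some (pvCut l)) none).filter pvChar).length := by
  induction l using List.reverseRecOn with
  | nil => rfl
  | append_singleton l e ih =>
    have hb := pvCut_bounds l
    rw [List.reverse_append, List.reverse_singleton, List.singleton_append]
    have hcons : pvCountBack (e :: l.reverse)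
        = if pvSep e then 0
          else (if pvChar e then 1 else 0) + pvCountBack l.reverse := rfl
    rw [hcons, pvCut_append]
    by_cases hs : pvSep e
    · simp only [hs, if_true]
      rw [PySem.List.slice_from _ (by omega)]
      have : ((l.length : Int) + 1).toNat = l.length + 1 := by omega
      rw [this, List.drop_eq_nil_of_le (by simp)]
      simp
    · simp only [hs, if_false, Bool.false_eq_true]
      rw [PySem.List.slice_from _ hb.1, List.drop_append_of_le_length (by omega),
          List.filter_append, List.length_append, ih,
          PySem.List.slice_from _ hb.1]
      by_cases hc : pvChar e <;> simp [hc, Nat.add_comm]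

-- ===== VERDICT (by name: the statement is the Claim_ definition above) =====
theorem looks_like_list_entry_py_spec : Claim_equal_looks_like_list_entry_py := by
  intro eb ea _
  unfold Spec_looks_like_list_entry_py looks_like_list_entry_py looks_like_list_entry_py_alt
  by_cases hea : ea = []
  · simp [hea]
  · simp only [if_neg hea, countBack_eq_filter_suffix]
    set n := ((PySem.List.slice eb (some (pvCut eb)) none).filter pvChar).length
    by_cases h : 1 ≤ n ∧ n ≤ 120 <;> simp [h]
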